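-- pv_equiv track=rewrite | github.com/grepme/StartupEdmontonBillboard | StartupEdmontonBillBoard.py | compare_events
-- ===== SOURCE A (Python) =====
-- def find_event_property(properties, value, events):
--     """Returns true if a property with a value was found within the events list, else false."""
--     for event in events:
--         if properties in event and event[properties] == value:
--             return True
--     return False
--
-- def compare_events(events_prev, events_new):
--     """Compare two event arrays to determine if they have lost/gained anything significant since last check."""
--     # Fields we are interested in monitoring
--     fields = ['start', 'end', 'summary', 'location', 'description']
--
--     # The most obvious check is just the length of the previous event list, and the current.
--     # If event length has changed, then we need to update.
--     if len(events_prev) != len(events_new):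
--         return False
--
--     # Scan all previous events and compare attributes to current
--     for event in events_prev:
--         for field in fields:
--
--             # If the field exists in some event, then it likely didn't change
--             # TODO: This is invalid if two fields have the same field/value and then one changes.
--             if field in event and not find_event_property(field, event[field], events_new):
--                 # No match found, something has changed.
--                 return False
--
--     # All checks done, nothing has changed since our last check
--     return True
-- ===== SOURCE B (Python) =====
-- def compare_events(events_prev, events_new):
--     """Compare two event arrays to determine if they have lost/gained anything significant since last check."""
--     fields = ('start', 'end', 'summary', 'location', 'description')
--     if len(events_prev) != len(events_new):
--         return False
--     required = {(f, e[f]) for e in events_prev for f in fields if f in e}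
--     available = {(f, e[f]) for e in events_new for f in fields if f in e}
--     return required <= available
-- ===== Notes on version B (the rewrite author's own statement) =====
-- stated objective: simpler
-- what changed: Replaces the nested per-event-per-field scan with the find_event_property helper by building two (field,value) sets in one pass each and returning a single subset test.
import Mathlib
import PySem

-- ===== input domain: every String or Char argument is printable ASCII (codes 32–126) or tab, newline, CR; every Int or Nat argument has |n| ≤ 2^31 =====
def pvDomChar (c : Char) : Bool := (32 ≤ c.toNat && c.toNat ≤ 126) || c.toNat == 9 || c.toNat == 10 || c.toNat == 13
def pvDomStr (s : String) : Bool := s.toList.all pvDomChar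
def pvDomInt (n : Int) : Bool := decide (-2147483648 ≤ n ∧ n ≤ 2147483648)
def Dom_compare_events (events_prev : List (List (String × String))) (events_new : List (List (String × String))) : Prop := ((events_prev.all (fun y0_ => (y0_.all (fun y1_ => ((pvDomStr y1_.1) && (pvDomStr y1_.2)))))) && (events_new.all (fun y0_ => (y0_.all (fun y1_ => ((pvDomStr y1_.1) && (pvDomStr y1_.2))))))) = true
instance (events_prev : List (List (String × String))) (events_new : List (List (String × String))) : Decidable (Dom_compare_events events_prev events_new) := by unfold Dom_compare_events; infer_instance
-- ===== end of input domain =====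

-- B replaces A's nested per-event linear scans by two one-pass (field, value) set builds and a subset test (objective: simpler).

-- ===== PORT A =====
-- the monitored fields list of compare_events
def pvFields : List String := ["start", "end", "summary", "location", "description"]

-- helper find_event_property: loop over events with early return True
def find_event_property (properties : String) (value : String)
    (events : List (List (String × String))) : Bool :=
  match events with
  | [] => false
  | event :: rest =>
      if (PySem.Dict.mk event).contains properties
          && ((PySem.Dict.mk event).getD properties "" == value) then true
      else find_event_property properties value rest

def compare_events (events_prev : List (List (String × String))) (events_new : List (List (String × String))) : Bool :=
  if events_prev.length ≠ events_new.length then false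
  else
    -- for event in events_prev: for field in fields: early return False = all/all of the negated test
    events_prev.all (fun event =>
      pvFields.all (fun field =>
        !((PySem.Dict.mk event).contains field
            && !find_event_property field ((PySem.Dict.mk event).getD field "") events_new)))

-- ===== PORT B =====
-- {(f, e[f]) for e in events for f in fields if f in e}
def pvPairs (events : List (List (String × String))) : PySem.Set (String × String) :=
  PySem.Set.ofList (events.flatMap (fun e =>
    pvFields.filterMap (fun f => ((PySem.Dict.mk e).get? f).map (fun v => (f, v)))))

def compare_events_alt (events_prev : List (List (String × String))) (events_new : List (List (String × String))) : Bool :=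
  if events_prev.length ≠ events_new.length then false
  else PySem.Set.issubset (pvPairs events_prev) (pvPairs events_new)

-- ===== PRECONDITION & SPEC =====
def Spec_compare_events (events_prev : List (List (String × String))) (events_new : List (List (String × String))) (out : Bool) : Prop := out = compare_events_alt events_prev events_new
instance (events_prev : List (List (String × String))) (events_new : List (List (String × String))) (out : Bool) : Decidable (Spec_compare_events events_prev events_new out) := by unfold Spec_compare_events; infer_instance

-- ===== CLAIM (what is proved, stated in full; the proofs are below) =====
def Claim_equal_compare_events : Prop := ∀ (events_prev : List (List (String × String))) (events_new : List (List (String × String))), Dom_compare_events events_prev events_new → Spec_compare_events events_prev events_new (compare_events events_prev events_new)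

-- ===== LEMMAS AND PROOFS =====

-- A's per-event test 'field in event and event[field] == value' is the lookup equation
lemma dict_test_eq (e : List (String × String)) (f v : String) :
    ((PySem.Dict.mk e).contains f && ((PySem.Dict.mk e).getD f "" == v))
      = ((PySem.Dict.mk e).get? f == some v) := by
  rw [PySem.Dict.contains_eq_isSome_get?, PySem.Dict.getD_eq_get?_getD]
  cases h : (PySem.Dict.mk e).get? f <;> simp

lemma find_event_property_iff (f v : String) (events : List (List (String × String))) :
    find_event_property f v events = true ↔
      ∃ e ∈ events, (PySem.Dict.mk e).get? f = some v := by
  induction events with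
  | nil => simp [find_event_property]
  | cons e rest ih =>
      rw [find_event_property, dict_test_eq]
      by_cases h : (PySem.Dict.mk e).get? f = some v <;> simp [h, ih]

lemma mem_pvPairs (events : List (List (String × String))) (f v : String) :
    (f, v) ∈ pvPairs events ↔
      f ∈ pvFields ∧ ∃ e ∈ events, (PySem.Dict.mk e).get? f = some v := by
  unfold pvPairs
  rw [PySem.Set.mem_ofList]
  simp only [List.mem_flatMap, List.mem_filterMap, Option.map_eq_some_iff]
  constructor
  · rintro ⟨e, he, f', hf', v', hv', heq⟩
    cases heq
    exact ⟨hf', e, he, hv'⟩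
  · rintro ⟨hf, e, he, hv⟩
    exact ⟨e, he, f, hf, v, hv, rfl⟩

-- ===== VERDICT (by name: the statement is the Claim_ definition above) =====
theorem compare_events_spec : Claim_equal_compare_events := by
  intro events_prev events_new _
  unfold Spec_compare_events compare_events compare_events_alt
  by_cases hlen : events_prev.length ≠ events_new.length
  · simp [hlen]
  · simp only [hlen, if_false]
    rw [Bool.eq_iff_iff, List.all_eq_true, PySem.Set.issubset_iff]
    constructor
    · rintro h ⟨f, v⟩ hmem
      rw [mem_pvPairs] at hmem
      obtain ⟨hf, e, he, hv⟩ := hmem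
      have h2 := (List.all_eq_true.mp (h e he)) f hf
      rw [Bool.not_eq_eq_eq_not, Bool.not_true, Bool.and_eq_false_iff] at h2
      rw [mem_pvPairs]
      refine ⟨hf, ?_⟩
      rcases h2 with h2 | h2
      · rw [PySem.Dict.contains_eq_isSome_get?, hv] at h2; simp at h2
      · rw [Bool.not_eq_false'] at h2
        have := (find_event_property_iff f ((PySem.Dict.mk e).getD f "") events_new).mp h2
        have hgd : (PySem.Dict.mk e).getD f "" = v := by
          rw [PySem.Dict.getD_eq_get?_getD, hv]; rfl
        rwa [hgd] at this
    · intro hsub e he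
      rw [List.all_eq_true]
      intro f hf
      rw [Bool.not_eq_eq_eq_not, Bool.not_true, Bool.and_eq_false_iff]
      by_cases hc : (PySem.Dict.mk e).contains f = true
      · right
        rw [Bool.not_eq_false']
        obtain ⟨v, hv⟩ := Option.isSome_iff_exists.mp
          (by rwa [PySem.Dict.contains_eq_isSome_get?] at hc)
        have hin : (f, v) ∈ pvPairs events_prev := (mem_pvPairs _ _ _).mpr ⟨hf, e, he, hv⟩
        have hout := (mem_pvPairs _ _ _).mp (hsub _ hin)
        have hgd : (PySem.Dict.mk e).getD f "" = v := by
          rw [PySem.Dict.getD_eq_get?_getD, hv]; rfl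
        rw [find_event_property_iff, hgd]
        exact hout.2
      · left; exact Bool.eq_false_iff.mpr hc
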